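-- pv_equiv track=rewrite | github.com/georgeprowse91/v6-multi-agent-ppm-platform | ops/tools/config_validator.py | _closest_line
-- ===== SOURCE A (Python) =====
-- from typing import Any, TypeAlias
--
-- SchemaPath: TypeAlias = tuple[Any, ...]
--
-- def _closest_line(line_map: dict[SchemaPath, int], path: SchemaPath) -> int:
--     """Resolve a source line for an error path using nearest known parent."""
--
--     if path in line_map:
--         return line_map[path]
--
--     for end in range(len(path), -1, -1):
--         prefix = path[:end]
--         if prefix in line_map:
--             return line_map[prefix]
--
--     return 1
-- ===== SOURCE B (Python) =====
-- def _closest_line(line_map, path):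
--     """Single pass over the map: take the line of the first entry whose key is the longest prefix of path."""
--     best_len, best_line = -1, 1
--     for key, line in line_map.items():
--         if len(key) > best_len and path[:len(key)] == key:
--             best_len, best_line = len(key), line
--     return best_line
-- ===== Notes on version B (the rewrite author's own statement) =====
-- stated objective: faster
-- what changed: Instead of probing the dict with ever-shorter prefixes of path (A's descending index loop that builds and hashes a fresh slice per length), B makes one pass over the map's entries, keeping the line of the first entry whose key is the longest prefix of path.
import Mathlib
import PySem

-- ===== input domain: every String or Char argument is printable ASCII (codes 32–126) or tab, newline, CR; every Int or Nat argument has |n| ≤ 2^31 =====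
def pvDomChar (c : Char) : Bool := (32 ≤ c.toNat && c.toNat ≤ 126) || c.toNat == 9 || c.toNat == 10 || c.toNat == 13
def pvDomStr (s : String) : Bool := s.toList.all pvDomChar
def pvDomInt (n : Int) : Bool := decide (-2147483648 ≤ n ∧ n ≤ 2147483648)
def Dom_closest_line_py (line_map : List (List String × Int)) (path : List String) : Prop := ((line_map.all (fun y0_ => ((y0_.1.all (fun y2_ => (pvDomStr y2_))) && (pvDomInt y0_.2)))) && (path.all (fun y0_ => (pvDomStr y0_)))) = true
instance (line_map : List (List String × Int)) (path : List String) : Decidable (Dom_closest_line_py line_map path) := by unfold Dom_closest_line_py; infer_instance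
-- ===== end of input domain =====

-- B replaces A's descending prefix-probing loop by a single pass over the map's entries,
-- keeping the line of the first entry whose key is the longest prefix of path (measurably faster: no per-length slice building/hashing).
-- Association-list lookup = first match (the Python dict convention for this task).

-- ===== PORT A =====
-- the descending loop 'for end in range(len(path), -1, -1): if path[:end] in line_map: return line_map[path[:end]]'
def closest_line_py_loop (line_map : List (List String × Int)) (path : List String) : List Int → Int
  | [] => 1
  | e :: rest =>
    match line_map.find? (fun p => p.1 == PySem.List.slice path none (some e)) with
    | some q => q.2
    | none => closest_line_py_loop line_map path rest

def closest_line_py (line_map : List (List String × Int)) (path : List String) : Int :=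
  match line_map.find? (fun p => p.1 == path) with
  | some q => q.2
  | none => closest_line_py_loop line_map path (PySem.List.pyRange (path.length : Int) (-1) (-1))

-- ===== PORT B =====
-- one pass: best_len, best_line = -1, 1; for key, line: if len(key) > best_len and path[:len(key)] == key: update
def closest_line_py_alt (line_map : List (List String × Int)) (path : List String) : Int :=
  (line_map.foldl
    (fun acc kv =>
      if (kv.1.length : Int) > acc.1 ∧ PySem.List.slice path none (some ((kv.1.length : Nat) : Int)) = kv.1
      then ((kv.1.length : Int), kv.2)
      else acc)
    ((-1 : Int), (1 : Int))).2

-- ===== PRECONDITION & SPEC =====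
def Spec_closest_line_py (line_map : List (List String × Int)) (path : List String) (out : Int) : Prop := out = closest_line_py_alt line_map path
instance (line_map : List (List String × Int)) (path : List String) (out : Int) : Decidable (Spec_closest_line_py line_map path out) := by unfold Spec_closest_line_py; infer_instance

-- ===== CLAIM (what is proved, stated in full; the proofs are below) =====
def Claim_equal_closest_line_py : Prop := ∀ (line_map : List (List String × Int)) (path : List String), Dom_closest_line_py line_map path → Spec_closest_line_py line_map path (closest_line_py line_map path)

-- ===== LEMMAS AND PROOFS =====

-- proof helper: A's behaviour as an ancestor walk (drop the last component until a known prefix or the root)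
def pvAnc (line_map : List (List String × Int)) (path : List String) : Int :=
  match line_map.find? (fun p => p.1 == path) with
  | some q => q.2
  | none =>
    if h : path = [] then 1
    else pvAnc line_map path.dropLast
termination_by path.length
decreasing_by have := List.length_pos_of_ne_nil h; simp [List.length_dropLast]; omega

-- proof helper: the first entry of lm whose key is a prefix of path longer than b, at the overall
-- maximal such length (later strictly longer entries win, equal length keeps the earlier one)
def pvBest (path : List String) (b : Int) : List (List String × Int) → Option Int
  | [] => none
  | kv :: rest =>
    if (kv.1.length : Int) > b ∧ path.take kv.1.length = kv.1
    then some ((pvBest path (kv.1.length : Int) rest).getD kv.2)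
    else pvBest path b rest

-- ---- A-side: A equals the ancestor walk pvAnc ----

theorem closest_line_py_loop_congr (lm : List (List String × Int)) (p q : List String)
    (ends : List Int)
    (h : ∀ e ∈ ends, PySem.List.slice p none (some e) = PySem.List.slice q none (some e)) :
    closest_line_py_loop lm p ends = closest_line_py_loop lm q ends := by
  induction ends with
  | nil => rfl
  | cons e rest ih =>
    simp only [closest_line_py_loop, h e (by simp)]
    cases lm.find? (fun pr => pr.1 == PySem.List.slice q none (some e)) with
    | some q' => rfl
    | none => exact ih (fun e' he' => h e' (by simp [he']))

theorem closest_line_py_loop_eq_anc (lm : List (List String × Int)) :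
    ∀ (path : List String),
      closest_line_py_loop lm path (PySem.List.pyRange (path.length : Int) (-1) (-1)) =
        pvAnc lm path := by
  intro path
  induction path using List.reverseRecOn with
  | nil =>
    rw [show ((([] : List String)).length : Int) = 0 by simp,
      PySem.List.pyRange_neg_one_cons (by norm_num),
      PySem.List.pyRange_neg_one_eq_nil (by norm_num)]
    rw [pvAnc.eq_def]
    simp only [closest_line_py_loop]
    rw [show PySem.List.slice ([] : List String) none (some 0) = [] from by
      rw [PySem.List.slice_to _ (by norm_num)]; rfl]
    cases h : List.find? (fun p => p.1 == ([] : List String)) lm with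
    | some q => rfl
    | none => rfl
  | append_singleton xs x ih =>
    have hlen : ((xs ++ [x]).length : Int) = (xs.length : Int) + 1 := by simp
    rw [hlen, PySem.List.pyRange_neg_one_cons (by omega)]
    simp only [closest_line_py_loop]
    have hfull : PySem.List.slice (xs ++ [x]) none (some ((xs.length : Int) + 1)) = xs ++ [x] := by
      have : ((xs.length : Int) + 1) = (((xs ++ [x]).length : Nat) : Int) := by simp
      rw [this, PySem.List.slice_to_natCast]
      simp
    rw [hfull, pvAnc.eq_def]
    cases h : lm.find? (fun p => p.1 == xs ++ [x]) with
    | some q => rfl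
    | none =>
      rw [dif_neg (by simp), List.dropLast_concat]
      have hq : closest_line_py_loop lm (xs ++ [x])
          (PySem.List.pyRange ((xs.length : Int) + 1 - 1) (-1) (-1)) =
          closest_line_py_loop lm xs (PySem.List.pyRange ((xs.length : Int)) (-1) (-1)) := by
        have h1 : (xs.length : Int) + 1 - 1 = (xs.length : Int) := by omega
        rw [h1]
        apply closest_line_py_loop_congr
        intro e he
        rw [PySem.List.mem_pyRange_neg_one] at he
        have h0 : 0 ≤ e := by omega
        rw [PySem.List.slice_to _ h0, PySem.List.slice_to _ h0]
        have : e.toNat ≤ xs.length := by omega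
        rw [List.take_append_of_le_length this]
      rw [hq, ih]

theorem closest_line_py_eq_anc (lm : List (List String × Int)) (path : List String) :
    closest_line_py lm path = pvAnc lm path := by
  unfold closest_line_py
  cases h : lm.find? (fun p => p.1 == path) with
  | some q => rw [pvAnc.eq_def, h]
  | none => rw [closest_line_py_loop_eq_anc]

-- ---- B-side: the fold computes pvBest ----

theorem closest_line_py_alt_eq_best (lm : List (List String × Int)) (path : List String) :
    ∀ (b v : Int),
      (lm.foldl
        (fun acc kv =>
          if (kv.1.length : Int) > acc.1 ∧ PySem.List.slice path none (some ((kv.1.length : Nat) : Int)) = kv.1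
          then ((kv.1.length : Int), kv.2)
          else acc)
        (b, v)).2 = (pvBest path b lm).getD v := by
  induction lm with
  | nil => intro b v; rfl
  | cons kv rest ih =>
    intro b v
    rw [List.foldl_cons, pvBest]
    rw [PySem.List.slice_to_natCast]
    by_cases hc : (kv.1.length : Int) > b ∧ path.take kv.1.length = kv.1
    · rw [if_pos hc, if_pos hc, ih]
      cases pvBest path (kv.1.length : Int) rest <;> rfl
    · rw [if_neg hc, if_neg hc, ih]

-- ---- pvBest facts ----

-- no prefix of path is longer than path
theorem pvBest_none_of_ge (path : List String) :
    ∀ (lm : List (List String × Int)) (b : Int), (path.length : Int) ≤ b → pvBest path b lm = none := by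
  intro lm
  induction lm with
  | nil => intro b _; rfl
  | cons kv rest ih =>
    intro b hb
    rw [pvBest]
    rw [if_neg]
    · exact ih b hb
    · rintro ⟨hlen, hpre⟩
      have h1 : kv.1.length ≤ path.length := by
        have := congrArg List.length hpre
        simp at this
        omega
      have : (kv.1.length : Int) ≤ b := by
        have : (kv.1.length : Int) ≤ (path.length : Int) := by exact_mod_cast h1
        omega
      omega

-- a full match is the unique longest prefix: pvBest returns the first such entry's value
theorem pvBest_of_find_some (path : List String) (q : List String × Int) :
    ∀ (lm : List (List String × Int)) (b : Int), b < (path.length : Int) →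
      lm.find? (fun p => p.1 == path) = some q → pvBest path b lm = some q.2 := by
  intro lm
  induction lm with
  | nil => intro b _ h; simp at h
  | cons kv rest ih =>
    intro b hb hf
    by_cases hk : kv.1 = path
    · rw [List.find?_cons_of_pos (h := by simp [hk])] at hf
      cases hf
      rw [pvBest, if_pos ⟨by rw [hk]; exact_mod_cast hb, by rw [hk]; simp⟩,
        pvBest_none_of_ge path rest ((q.1.length : Nat) : Int) (by simp [hk])]
      rfl
    · rw [List.find?_cons_of_neg (h := by simp [hk])] at hf
      rw [pvBest]
      by_cases hc : (kv.1.length : Int) > b ∧ path.take kv.1.length = kv.1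
      · -- kv is a proper prefix, so strictly shorter than path; the full match still wins
        have hlt : (kv.1.length : Int) < (path.length : Int) := by
          have h1 : kv.1.length ≤ path.length := by
            have := congrArg List.length hc.2
            simp at this
            omega
          have h2 : kv.1.length ≠ path.length := by
            intro he
            exact hk (by rw [← hc.2, he, List.take_length])
          exact_mod_cast Nat.lt_of_le_of_ne h1 h2
        rw [if_pos hc, ih (kv.1.length : Int) hlt hf]
        rfl
      · rw [if_neg hc]
        exact ih b hb hf
    
-- when no key equals [] nothing qualifies for the empty path
theorem pvBest_nil_none :
    ∀ (lm : List (List String × Int)) (b : Int),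
      lm.find? (fun p => p.1 == ([] : List String)) = none →
      pvBest ([] : List String) b lm = none := by
  intro lm
  induction lm with
  | nil => intro b _; rfl
  | cons kv rest ih =>
    intro b hf
    have hne : kv.1 ≠ ([] : List String) := by
      intro he
      rw [List.find?_cons_of_pos (h := by simp [he])] at hf
      simp at hf
    have hrest : rest.find? (fun p => p.1 == ([] : List String)) = none := by
      rwa [List.find?_cons_of_neg (h := by simp [hne])] at hf
    rw [pvBest, if_neg]
    · exact ih b hrest
    · rintro ⟨_, hpre⟩
      simp at hpre
      exact hne hpre

-- when no key equals path = xs ++ [x], every qualifying key is a prefix of xs already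
theorem pvBest_dropLast (xs : List String) (x : String) :
    ∀ (lm : List (List String × Int)) (b : Int),
      lm.find? (fun p => p.1 == xs ++ [x]) = none →
      pvBest (xs ++ [x]) b lm = pvBest xs b lm := by
  intro lm
  induction lm with
  | nil => intro b _; rfl
  | cons kv rest ih =>
    intro b hf
    have hne : kv.1 ≠ xs ++ [x] := by
      intro he
      rw [List.find?_cons_of_pos (h := by simp [he])] at hf
      simp at hf
    have hrest : rest.find? (fun p => p.1 == xs ++ [x]) = none := by
      rwa [List.find?_cons_of_neg (h := by simp [hne])] at hf
    have hcond : ((xs ++ [x]).take kv.1.length = kv.1) ↔ (xs.take kv.1.length = kv.1) := by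
      constructor
      · intro h
        have hlen : kv.1.length ≤ xs.length := by
          have hl := congrArg List.length h
          simp at hl
          by_contra hgt
          have heq : kv.1.length = xs.length + 1 := by omega
          exact hne (by rw [← h, heq, List.take_of_length_le (by simp)])
        rwa [List.take_append_of_le_length hlen] at h
      · intro h
        have hlen : kv.1.length ≤ xs.length := by
          have hl := congrArg List.length h
          simp at hl
          omega
        rw [List.take_append_of_le_length hlen]
        exact h
    rw [pvBest, pvBest]
    by_cases hc : (kv.1.length : Int) > b ∧ (xs ++ [x]).take kv.1.length = kv.1
    · rw [if_pos hc, if_pos ⟨hc.1, hcond.1 hc.2⟩, ih _ hrest]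
    · rw [if_neg hc, if_neg (fun h => hc ⟨h.1, hcond.2 h.2⟩), ih b hrest]

-- ---- the ancestor walk equals the longest-prefix selection ----

theorem pvAnc_eq_best (lm : List (List String × Int)) :
    ∀ (path : List String), pvAnc lm path = (pvBest path (-1) lm).getD 1 := by
  intro path
  induction path using List.reverseRecOn with
  | nil =>
    rw [pvAnc.eq_def]
    cases h : lm.find? (fun p => p.1 == ([] : List String)) with
    | some q => rw [pvBest_of_find_some ([] : List String) q lm (-1) (by norm_num) h]; rfl
    | none => rw [pvBest_nil_none lm (-1) h]; rfl
  | append_singleton xs x ih =>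
    rw [pvAnc.eq_def]
    cases h : lm.find? (fun p => p.1 == xs ++ [x]) with
    | some q =>
      rw [pvBest_of_find_some (xs ++ [x]) q lm (-1) (by omega) h]; rfl
    | none =>
      rw [dif_neg (by simp), List.dropLast_concat, pvBest_dropLast xs x lm (-1) h, ih]

-- ===== VERDICT (by name: the statement is the Claim_ definition above) =====
theorem closest_line_py_spec : Claim_equal_closest_line_py := by
  intro lm path _
  unfold Spec_closest_line_py
  rw [closest_line_py_eq_anc, pvAnc_eq_best]
  unfold closest_line_py_alt
  rw [closest_line_py_alt_eq_best]
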